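-- pv_equiv track=rewrite | github.com/thierryxdp/TCC | problems/824/solution_112230.py | auxilio
-- ===== SOURCE A (Python) =====
-- def auxilio(frase):
--
--     nova_frase = frase
--     vogal = ['a', 'e', 'i', 'o', 'u', 'ã', 'ó', 'é', 'í', 'ú', ' ']
--     letra_mod = []
--     u = 0
--     posicao = []
--
--
--     for i in nova_frase:
--         if i not in vogal:
--             nova_frase = nova_frase.replace(i, str.upper(i))
--
--
--
--     return nova_frase
-- ===== SOURCE B (Python) =====
-- def auxilio(frase):
--     vogal = ['a', 'e', 'i', 'o', 'u', 'ã', 'ó', 'é', 'í', 'ú', ' ']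
--     table = str.maketrans({c: c.upper() for c in set(frase) if c not in vogal})
--     return frase.translate(table)
-- ===== Notes on version B (the rewrite author's own statement) =====
-- stated objective: faster
-- what changed: Replaces A's per-character loop of repeated global str.replace calls with a translation table built once from the distinct characters of the input and a single str.translate pass.
import Mathlib
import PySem

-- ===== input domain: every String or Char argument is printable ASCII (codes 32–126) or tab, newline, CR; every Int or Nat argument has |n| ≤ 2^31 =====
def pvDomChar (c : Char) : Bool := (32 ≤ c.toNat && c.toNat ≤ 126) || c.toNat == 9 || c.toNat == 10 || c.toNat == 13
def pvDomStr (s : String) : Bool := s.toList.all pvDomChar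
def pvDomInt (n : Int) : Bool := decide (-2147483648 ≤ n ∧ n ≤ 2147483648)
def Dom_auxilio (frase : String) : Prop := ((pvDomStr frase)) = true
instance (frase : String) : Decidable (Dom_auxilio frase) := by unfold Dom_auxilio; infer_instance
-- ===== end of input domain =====

-- B replaces A's per-character repeated global str.replace by a translation table built
-- once from the distinct characters and applied in a single translate pass (idiomatic).

-- the vowel/space list both Pythons define
def pvVog : List Char := ['a', 'e', 'i', 'o', 'u', 'ã', 'ó', 'é', 'í', 'ú', ' ']

-- ===== PORT A =====
def auxilio (frase : String) : String :=
  -- for i in nova_frase: if i not in vogal: nova_frase = nova_frase.replace(i, str.upper(i))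
  frase.toList.foldl
    (fun nova i =>
      if !(pvVog.contains i) then
        PySem.Str.replace nova (String.ofList [i]) (PySem.Str.upper (String.ofList [i]))
      else nova)
    frase

-- ===== PORT B =====
def auxilio_alt (frase : String) : String :=
  -- table = str.maketrans({c: c.upper() for c in set(frase) if c not in vogal})
  let table : PySem.Dict Char String :=
    (((PySem.Set.ofList frase.toList).filter (fun c => !(pvVog.contains c))).foldl
      (fun d c => d.insert c (PySem.Str.upper (String.ofList [c]))) PySem.Dict.empty)
  -- return frase.translate(table): each char mapped through the table, absent chars unchanged
  String.ofList (frase.toList.flatMap (fun c =>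
    match table.get? c with
    | some s => s.toList
    | none => [c]))

-- ===== PRECONDITION & SPEC =====
def Spec_auxilio (frase : String) (out : String) : Prop := out = auxilio_alt frase
instance (frase : String) (out : String) : Decidable (Spec_auxilio frase out) := by unfold Spec_auxilio; infer_instance

-- ===== CLAIM (what is proved, stated in full; the proofs are below) =====
def Claim_equal_auxilio : Prop := ∀ (frase : String), Dom_auxilio frase → Spec_auxilio frase (auxilio frase)

-- ===== LEMMAS AND PROOFS =====

-- uppercasing is idempotent on Char (the upper of a char is never a lowercase letter)
theorem pv_upperChar_idem (c : Char) :
    PySem.Chars.upperChar (PySem.Chars.upperChar c) = PySem.Chars.upperChar c := by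
  unfold PySem.Chars.upperChar PySem.Chars.islower
  split_ifs with h1 h2 <;> try rfl
  exfalso
  simp only [Bool.and_eq_true, decide_eq_true_eq] at h1 h2
  have h97 : 97 ≤ c.toNat := h1.1
  have h122 : c.toNat ≤ 122 := h1.2
  have hv : ((c.toNat - 32) : Nat).isValidChar := Or.inl (by omega)
  have ht : (Char.ofNat (c.toNat - 32)).toNat = c.toNat - 32 := by
    rw [Char.toNat_ofNat, if_pos hv]
  have hc' : 97 ≤ (Char.ofNat (c.toNat - 32)).toNat := h2.1
  omega

-- str.replace with a single-character pattern and single-character replacement is a per-char map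
theorem pv_replace_go_single (i j : Char) :
    ∀ (l : List Char) (fuel : Nat) (acc : List Char), l.length ≤ fuel →
      PySem.Chars.replace.go [i] [j] fuel l acc
        = acc.reverse ++ l.map (fun c => if c = i then j else c) := by
  intro l
  induction l with
  | nil =>
    intro fuel acc _
    cases fuel <;> simp [PySem.Chars.replace.go]
  | cons c t ih =>
    intro fuel acc hle
    cases fuel with
    | zero => simp at hle
    | succ f =>
      have hf : t.length ≤ f := by simpa using hle
      rw [PySem.Chars.replace.go]
      by_cases hci : i = c
      · subst hci
        simp only [List.isPrefixOf, BEq.rfl, Bool.true_and, if_true,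
          List.length_cons, List.drop_succ_cons, List.length_nil, List.drop_zero]
        rw [ih f ([j].reverse ++ acc) hf]
        simp
      · have hb : (i == c) = false := by simpa using hci
        simp only [List.isPrefixOf, hb, Bool.false_and, Bool.false_eq_true, if_false]
        rw [ih f (c :: acc) hf]
        simp only [List.reverse_cons, List.map_cons, List.append_assoc, List.singleton_append]
        rw [if_neg (fun h => hci h.symm)]

theorem pv_replace_single (s : List Char) (i j : Char) :
    PySem.Chars.replace s [i] [j] = s.map (fun c => if c = i then j else c) := by
  rw [PySem.Chars.replace]
  simpa using pv_replace_go_single i j s s.length [] (le_refl _)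

-- the final per-character map both programs compute
def pvF (c : Char) : Char := if pvVog.contains c then c else PySem.Chars.upperChar c

-- A's loop, phrased on List Char
def pvStepL (s : List Char) (i : Char) : List Char :=
  if !(pvVog.contains i) then s.map (fun c => if c = i then PySem.Chars.upperChar i else c) else s

-- bridge: A's String-level fold computes the List-level fold
theorem pv_foldA_bridge (l : List Char) :
    ∀ (s : String),
      (l.foldl
        (fun nova i =>
          if !(pvVog.contains i) then
            PySem.Str.replace nova (String.ofList [i]) (PySem.Str.upper (String.ofList [i]))
          else nova) s).toList
      = l.foldl pvStepL s.toList := by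
  induction l with
  | nil => intro s; rfl
  | cons i t ih =>
    intro s
    simp only [List.foldl_cons]
    by_cases hi : pvVog.contains i = true
    · simp only [pvStepL, hi, Bool.not_true, Bool.false_eq_true, if_false]
      exact ih s
    · have hb : pvVog.contains i = false := by simpa using hi
      simp only [pvStepL, hb, Bool.not_false, if_true]
      rw [show PySem.Str.replace s (String.ofList [i]) (PySem.Str.upper (String.ofList [i]))
            = String.ofList (s.toList.map (fun c => if c = i then PySem.Chars.upperChar i else c)) by
        simp [PySem.Str.replace, PySem.Chars.upper, pv_replace_single]]
      rw [ih (String.ofList (s.toList.map (fun c => if c = i then PySem.Chars.upperChar i else c)))]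
      simp

theorem pv_auxilio_toList (frase : String) :
    (auxilio frase).toList = frase.toList.foldl pvStepL frase.toList := by
  unfold auxilio
  exact pv_foldA_bridge frase.toList frase

-- A's fold over a list of iterated characters is a single conditional map
theorem pv_foldA_eq_map (rest : List Char) :
    ∀ s : List Char, rest.foldl pvStepL s
      = s.map (fun c => if c ∈ rest ∧ pvVog.contains c = false then PySem.Chars.upperChar c else c) := by
  induction rest with
  | nil => intro s; simp
  | cons i rest ih =>
    intro s
    simp only [List.foldl_cons]
    by_cases hi : pvVog.contains i = true
    · simp only [pvStepL, hi, Bool.not_true, Bool.false_eq_true, if_false]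
      rw [ih s]
      apply List.map_congr_left
      intro c _
      by_cases hc : c ∈ rest ∧ pvVog.contains c = false
      · rw [if_pos hc, if_pos ⟨List.mem_cons_of_mem i hc.1, hc.2⟩]
      · rw [if_neg hc, if_neg]
        rintro ⟨hmem, hvog⟩
        rcases List.mem_cons.mp hmem with h | h
        · rw [h] at hvog; rw [hvog] at hi; exact Bool.false_ne_true hi
        · exact hc ⟨h, hvog⟩
    · have hb : pvVog.contains i = false := by simpa using hi
      simp only [pvStepL, hb, Bool.not_false, if_true]
      rw [ih, List.map_map]
      apply List.map_congr_left
      intro c _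
      simp only [Function.comp]
      by_cases hci : c = i
      · subst hci
        have h1 : (if c = c then PySem.Chars.upperChar c else c) = PySem.Chars.upperChar c :=
          if_pos rfl
        rw [h1,
          if_pos (show c ∈ c :: rest ∧ pvVog.contains c = false from ⟨List.mem_cons_self, hb⟩)]
        by_cases h2 : PySem.Chars.upperChar c ∈ rest ∧ pvVog.contains (PySem.Chars.upperChar c) = false
        · rw [if_pos h2, pv_upperChar_idem]
        · rw [if_neg h2]
      · rw [if_neg hci]
        by_cases hc : c ∈ rest ∧ pvVog.contains c = false
        · rw [if_pos hc, if_pos ⟨List.mem_cons_of_mem i hc.1, hc.2⟩]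
        · rw [if_neg hc, if_neg]
          rintro ⟨hmem, hvog⟩
          rcases List.mem_cons.mp hmem with h | h
          · exact hci h
          · exact hc ⟨h, hvog⟩

-- A computes the per-character map pvF
theorem pv_auxilio_eq_map (frase : String) :
    (auxilio frase).toList = frase.toList.map pvF := by
  rw [pv_auxilio_toList, pv_foldA_eq_map]
  apply List.map_congr_left
  intro c hc
  by_cases hv : pvVog.contains c = true
  · rw [if_neg (fun h => by rw [h.2] at hv; exact Bool.false_ne_true hv), pvF, if_pos hv]
  · have hb : pvVog.contains c = false := by simpa using hv
    rw [if_pos ⟨hc, hb⟩, pvF, hb]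
    simp

-- B's table lookup: a key is mapped iff it occurs in the key list, to its uppercase
theorem pv_get?_table (l : List Char) :
    ∀ (d : PySem.Dict Char String) (c : Char),
      (l.foldl (fun d c => d.insert c (PySem.Str.upper (String.ofList [c]))) d).get? c
        = if c ∈ l then some (PySem.Str.upper (String.ofList [c])) else d.get? c := by
  induction l with
  | nil => intro d c; simp
  | cons a l ih =>
    intro d c
    simp only [List.foldl_cons]
    rw [ih]
    by_cases hcl : c ∈ l
    · rw [if_pos hcl, if_pos (List.mem_cons_of_mem a hcl)]
    · rw [if_neg hcl]
      by_cases hca : c = a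
      · subst hca
        rw [PySem.Dict.get?_insert_self, if_pos List.mem_cons_self]
      · rw [PySem.Dict.get?_insert_of_ne d _ hca, if_neg (by simp [hca, hcl])]

-- B computes the per-character map pvF
theorem pv_auxilio_alt_eq_map (frase : String) :
    (auxilio_alt frase).toList = frase.toList.map pvF := by
  unfold auxilio_alt
  simp only [String.toList_ofList]
  rw [show frase.toList.flatMap _ = frase.toList.flatMap (fun c => [pvF c]) from
    List.flatMap_congr (fun c hc => by
      rw [pv_get?_table]
      by_cases hv : pvVog.contains c = true
      · rw [if_neg (fun hmem => by
            have h2 : pvVog.contains c = false := by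
              simpa using (List.mem_filter.mp hmem).2
            rw [h2] at hv; exact Bool.false_ne_true hv),
          pvF, if_pos hv]
        simp
      · have hb : pvVog.contains c = false := by simpa using hv
        rw [if_pos (by
          simp only [List.mem_filter, hb, Bool.not_false, and_true]
          exact (PySem.Set.mem_ofList frase.toList c).mpr hc)]
        have hm : c ∉ pvVog := by simpa using hb
        simp [PySem.Chars.upper, pvF, hm])]
  exact List.map_eq_flatMap.symm

-- ===== VERDICT (by name: the statement is the Claim_ definition above) =====
theorem auxilio_spec : Claim_equal_auxilio := by
  intro frase _
  unfold Spec_auxilio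
  apply String.toList_inj.mp
  rw [pv_auxilio_eq_map, pv_auxilio_alt_eq_map]
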